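-- pv_equiv track=rewrite | github.com/aaronGeb/competitive-programming | A2SV Contest #26 20-Aug-2025/C - Maxim vs. String Chaos 387127.py | helper
-- ===== SOURCE A (Python) =====
-- def helper(s):
--     """
--     This Function Help Us To calculate the prefix of chars frequency
--     for both string by calling it twice
--
--     """
--     n = len(s)
--     memo = [[0] * (n + 1) for _ in range(26)]
--     for i, ch in enumerate(s, 1):
--         for c in range(26):
--             memo[c][i] = memo[c][i - 1]
--         memo[ord(ch) - ord('a')][i] += 1
--     return memo
-- ===== SOURCE B (Python) =====
-- def helper(s):
--     """Prefix character-frequency table, built in two phases: bucket the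
--     occurrence positions of each letter, then expand each bucket into its
--     prefix-count row by run lengths."""
--     n = len(s)
--     pos = [[] for _ in range(26)]
--     for i, ch in enumerate(s):
--         pos[ord(ch) - ord('a')].append(i)
--     memo = []
--     for ps in pos:
--         row = []
--         cnt = 0
--         last = 0
--         for p in ps:
--             row += [cnt] * (p + 1 - last)
--             cnt += 1
--             last = p + 1
--         row += [cnt] * (n + 1 - last)
--         memo.append(row)
--     return memo
-- ===== Notes on version B (the rewrite author's own statement) =====
-- stated objective: faster
-- what changed: Two-phase build: bucket each letter's occurrence positions in one pass, then expand every bucket into its prefix-count row by run-length repetition, replacing A's per-position loop that copies all 26 previous column entries; Pre_ excludes exactly the strings on which A raises IndexError (a character with code < 71 or > 122).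
import Mathlib
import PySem

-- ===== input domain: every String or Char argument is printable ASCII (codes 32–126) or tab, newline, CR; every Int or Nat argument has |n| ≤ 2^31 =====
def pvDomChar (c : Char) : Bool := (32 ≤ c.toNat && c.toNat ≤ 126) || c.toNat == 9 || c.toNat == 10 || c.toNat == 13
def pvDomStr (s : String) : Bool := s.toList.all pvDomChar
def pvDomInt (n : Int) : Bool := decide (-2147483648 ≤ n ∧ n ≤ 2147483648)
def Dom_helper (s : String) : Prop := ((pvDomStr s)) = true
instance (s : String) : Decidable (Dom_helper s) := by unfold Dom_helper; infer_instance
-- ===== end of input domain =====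

-- B buckets each letter's positions once and expands every bucket into its prefix row by run lengths
-- (constant-factor faster: no per-position copy of all 26 columns).

-- ===== PORT A =====
-- A's loop 'for i, ch in enumerate(s, 1)': i carried explicitly; the inner
-- 'for c in range(26): memo[c][i] = memo[c][i-1]' is the map over the 26 rows.
-- 'memo[ord(ch)-97]' uses Python negative indexing on the 26-row list; the
-- 'if idx < 0 then idx + 26' resolution is exact for -26 ≤ idx < 26, i.e. on
-- every input where Python A returns (Pre_helper).
def helperGo (i : Nat) (memo : List (List Int)) : List Char → List (List Int)
  | [] => memo
  | ch :: rest =>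
      let memo1 := memo.map (fun row => row.set i (row.getD (i - 1) 0))
      let idx : Int := (ch.toNat : Int) - 97
      let r : Nat := (if idx < 0 then idx + 26 else idx).toNat
      helperGo (i + 1) (memo1.modify r (fun row => row.set i (row.getD i 0 + 1))) rest

def helper (s : String) : List (List Int) :=
  helperGo 1 (List.replicate 26 (List.replicate (s.length + 1) 0)) s.toList

-- ===== PORT B =====
-- phase 1 of Source B: 'for i, ch in enumerate(s): pos[ord(ch)-97].append(i)';
-- the negative Python list index wraps, resolved exactly as in port A.
def bucketGo (i : Nat) (pos : List (List Nat)) : List Char → List (List Nat)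
  | [] => pos
  | ch :: rest =>
      let idx : Int := (ch.toNat : Int) - 97
      let r : Nat := (if idx < 0 then idx + 26 else idx).toNat
      bucketGo (i + 1) (pos.modify r (fun ps => ps ++ [i])) rest

-- phase 2 of Source B: the 'for p in ps' run-length expansion of one row.
def rowGo (n : Nat) (cnt : Int) (last : Nat) : List Nat → List Int
  | [] => List.replicate (n + 1 - last) cnt
  | p :: ps => List.replicate (p + 1 - last) cnt ++ rowGo n (cnt + 1) (p + 1) ps

def helper_alt (s : String) : List (List Int) :=
  (bucketGo 0 (List.replicate 26 []) s.toList).map (rowGo s.length 0 0)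

-- ===== PRECONDITION & SPEC =====
-- Pre_ excludes exactly the inputs where Python A raises IndexError: a char with
-- code < 71 or > 122 makes the row index ord(ch)-97 fall outside [-26, 25].
def Pre_helper (s : String) : Prop :=
  (s.toList.all (fun c => 71 ≤ c.toNat && c.toNat ≤ 122)) = true
instance (s : String) : Decidable (Pre_helper s) := by unfold Pre_helper; infer_instance
def pvWitness_helper : String := "abc"

def Spec_helper (s : String) (out : List (List Int)) : Prop := out = helper_alt s
instance (s : String) (out : List (List Int)) : Decidable (Spec_helper s out) := by
  unfold Spec_helper; infer_instance

-- ===== CLAIM (what is proved, stated in full; the proofs are below) =====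
def Claim_equal_helper : Prop := ∀ (s : String), Dom_helper s → Pre_helper s → Spec_helper s (helper s)

-- ===== LEMMAS AND PROOFS =====

-- the row index a char lands in (both ports resolve the Python index this way)
def pvRowOf (ch : Char) : Nat :=
  (if (ch.toNat : Int) - 97 < 0 then (ch.toNat : Int) - 97 + 26 else (ch.toNat : Int) - 97).toNat

def pvPred (c : Nat) (ch : Char) : Bool := pvRowOf ch == c

-- the table after processing a prefix p: row c, column j counts chars of p.take j in row c
def pvTbl (n : Nat) (p : List Char) : List (List Int) :=
  (List.range 26).map (fun c => (List.range (n + 1)).map (fun j =>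
    if j ≤ p.length then (((p.take j).countP (pvPred c) : Nat) : Int) else 0))

theorem pv_pred_iff (c : Nat) (ch : Char) : pvPred c ch = true ↔ c = pvRowOf ch := by
  unfold pvPred
  rw [beq_iff_eq, eq_comm]

theorem pv_set_map_range {m i : Nat} (g : Nat → Int) (v : Int) (_hi : i < m) :
    ((List.range m).map g).set i v
      = (List.range m).map (fun j => if j = i then v else g j) := by
  apply List.ext_getElem
  · simp
  · intro j h1 h2
    simp only [List.getElem_set, List.getElem_map, List.getElem_range]
    by_cases h : i = j
    · simp [h]
    · simp [h, Ne.symm h]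

theorem pv_modify_map_range {α : Type} {m r : Nat} (g : Nat → α) (f : α → α) :
    ((List.range m).map g).modify r f
      = (List.range m).map (fun c => if c = r then f (g c) else g c) := by
  apply List.ext_getElem
  · simp
  · intro j h1 h2
    simp only [List.getElem_modify, List.getElem_map, List.getElem_range]
    by_cases h : r = j
    · simp [h]
    · simp [h, Ne.symm h]

theorem pv_getD_map_range {m i : Nat} (g : Nat → Int) (hi : i < m) :
    ((List.range m).map g).getD i 0 = g i := by
  rw [List.getD_eq_getElem?_getD]
  simp [hi]

theorem pv_helperGo_inv (n : Nat) :
    ∀ (rest p : List Char),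
      p.length + rest.length ≤ n →
      helperGo (p.length + 1) (pvTbl n p) rest = pvTbl n (p ++ rest) := by
  intro rest
  induction rest with
  | nil => intro p _; simp [helperGo]
  | cons ch rest ih =>
      intro p hlen
      simp only [List.length_cons] at hlen
      have hi : p.length + 1 < n + 1 := by omega
      set r : Nat := pvRowOf ch with hr
      rw [helperGo]
      have hstep :
          ((pvTbl n p).map (fun row => row.set (p.length + 1) (row.getD (p.length + 1 - 1) 0))).modify
              ((if (ch.toNat : Int) - 97 < 0 then (ch.toNat : Int) - 97 + 26 else (ch.toNat : Int) - 97).toNat)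
              (fun row => row.set (p.length + 1) (row.getD (p.length + 1) 0 + 1))
            = pvTbl n (p ++ [ch]) := by
        show ((pvTbl n p).map _).modify r _ = _
        unfold pvTbl
        rw [List.map_map]
        have hmap1 :
            ((fun row => row.set (p.length + 1) (row.getD (p.length + 1 - 1) 0)) ∘ fun c => (List.range (n + 1)).map (fun j =>
                if j ≤ p.length then (((p.take j).countP (pvPred c) : Nat) : Int) else 0))
              = (fun c => (List.range (n + 1)).map (fun j =>
                  if j = p.length + 1 then ((p.countP (pvPred c) : Nat) : Int)
                  else if j ≤ p.length then (((p.take j).countP (pvPred c) : Nat) : Int) else 0)) := by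
          funext c
          simp only [Function.comp_apply]
          rw [pv_getD_map_range _ (by omega), pv_set_map_range _ _ hi]
          simp
        rw [hmap1]
        rw [pv_modify_map_range]
        apply List.map_congr_left
        intro c hc
        simp only [List.mem_range] at hc
        by_cases hcr : c = r
        · have hp : pvPred c ch = true := (pv_pred_iff c ch).mpr (by rw [hcr, hr])
          rw [if_pos hcr]
          rw [pv_getD_map_range _ hi, pv_set_map_range _ _ hi]
          apply List.map_congr_left
          intro j hj
          simp only [List.mem_range] at hj
          by_cases hji : j = p.length + 1
          · subst hji
            have htake : List.take (p.length + 1) (p ++ [ch]) = p ++ [ch] :=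
              List.take_of_length_le (by simp)
            have hcnt : (p ++ [ch]).countP (pvPred c) = p.countP (pvPred c) + 1 := by
              rw [List.countP_append]
              simp [hp]
            simp only [htake, hcnt, List.length_append, List.length_cons, List.length_nil]
            split_ifs <;> push_cast <;> omega
          · rw [if_neg hji, if_neg hji]
            by_cases hjp : j ≤ p.length
            · rw [if_pos hjp, if_pos (by simp; omega), List.take_append_of_le_length hjp]
            · rw [if_neg hjp, if_neg (by simp; omega)]
        · have hp : pvPred c ch = false := by
            rw [← Bool.not_eq_true]
            intro h
            exact hcr (by rw [(pv_pred_iff c ch).mp h, hr])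
          rw [if_neg hcr]
          apply List.map_congr_left
          intro j hj
          simp only [List.mem_range] at hj
          by_cases hji : j = p.length + 1
          · subst hji
            have htake : List.take (p.length + 1) (p ++ [ch]) = p ++ [ch] :=
              List.take_of_length_le (by simp)
            have hcnt : (p ++ [ch]).countP (pvPred c) = p.countP (pvPred c) := by
              rw [List.countP_append]
              simp [hp]
            simp only [htake, hcnt, List.length_append, List.length_cons, List.length_nil]
            split_ifs <;> omega
          · rw [if_neg hji]
            by_cases hjp : j ≤ p.length
            · rw [if_pos hjp, if_pos (by simp; omega), List.take_append_of_le_length hjp]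
            · rw [if_neg hjp, if_neg (by simp; omega)]
      simp only at hstep ⊢
      rw [hstep]
      have := ih (p ++ [ch]) (by simp; omega)
      simpa [List.append_assoc] using this

theorem pv_tbl_nil (n : Nat) :
    pvTbl n [] = List.replicate 26 (List.replicate (n + 1) 0) := by
  unfold pvTbl
  apply List.ext_getElem
  · simp
  · intro i h1 h2
    simp only [List.getElem_map, List.getElem_range, List.getElem_replicate]
    apply List.ext_getElem
    · simp
    · intro j h3 h4
      simp only [List.getElem_map, List.getElem_range, List.getElem_replicate]
      split <;> simp_all

-- B side: the positions (with offset) of the chars of l falling in row c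
def pvPositions (c : Nat) (off : Nat) : List Char → List Nat
  | [] => []
  | ch :: rest => (if pvPred c ch then [off] else []) ++ pvPositions c (off + 1) rest

theorem pv_positions_bound (c : Nat) :
    ∀ (l : List Char) (off p : Nat), p ∈ pvPositions c off l → off ≤ p ∧ p < off + l.length := by
  intro l
  induction l with
  | nil => intro off p h; simp [pvPositions] at h
  | cons ch rest ih =>
      intro off p h
      simp only [pvPositions, List.mem_append] at h
      rcases h with h | h
      · split at h <;> simp_all
      · have := ih (off + 1) p h
        simp only [List.length_cons]; omega

theorem pv_bucketGo_inv :
    ∀ (rest : List Char) (i : Nat) (f : Nat → List Nat),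
      bucketGo i ((List.range 26).map f) rest
        = (List.range 26).map (fun c => f c ++ pvPositions c i rest) := by
  intro rest
  induction rest with
  | nil => intro i f; simp [bucketGo, pvPositions]
  | cons ch rest ih =>
      intro i f
      rw [bucketGo]
      show bucketGo (i + 1) (((List.range 26).map f).modify (pvRowOf ch) _) rest = _
      rw [pv_modify_map_range]
      rw [ih]
      apply List.map_congr_left
      intro c hc
      by_cases hcr : c = pvRowOf ch
      · have hp : pvPred c ch = true := (pv_pred_iff c ch).mpr hcr
        rw [hcr] at hp
        simp [hcr, pvPositions, hp]
      · have hp : pvPred c ch = false := by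
          rw [← Bool.not_eq_true]; intro h; exact hcr ((pv_pred_iff c ch).mp h)
        simp [hcr, pvPositions, hp]

theorem pv_positions_countP (c : Nat) :
    ∀ (l : List Char) (off j : Nat),
      (pvPositions c off l).countP (fun p => decide (p < off + j))
        = (l.take j).countP (pvPred c) := by
  intro l
  induction l with
  | nil => intro off j; simp [pvPositions]
  | cons ch rest ih =>
      intro off j
      cases j with
      | zero =>
          simp only [List.take_zero, List.countP_nil, Nat.add_zero]
          rw [List.countP_eq_zero]
          intro p hp
          have := pv_positions_bound c (ch :: rest) off p hp
          simp only [decide_eq_true_eq]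
          omega
      | succ j =>
          simp only [pvPositions, List.countP_append, List.take_succ_cons, List.countP_cons]
          have htail : (pvPositions c (off + 1) rest).countP (fun p => decide (p < off + (j + 1)))
              = (rest.take j).countP (pvPred c) := by
            rw [← ih (off + 1) j]
            apply List.countP_congr
            intro p _
            simp only [decide_eq_true_eq]
            omega
          rw [htail]
          by_cases hp : pvPred c ch = true
          · simp [hp]
            omega
          · have hp' : pvPred c ch = false := Bool.not_eq_true _ ▸ (by simpa using hp)
            simp [hp']

theorem pv_rowGo_eq (n : Nat) :
    ∀ (ps : List Nat) (cnt : Int) (last : Nat),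
      last ≤ n + 1 →
      (∀ p ∈ ps, last ≤ p ∧ p < n) →
      List.Pairwise (· < ·) ps →
      rowGo n cnt last ps
        = (List.range' last (n + 1 - last)).map (fun j => cnt + ((ps.countP (fun p => decide (p < j)) : Nat) : Int)) := by
  intro ps
  induction ps with
  | nil =>
      intro cnt last _ _ _
      simp only [rowGo, List.countP_nil]
      symm
      rw [List.eq_replicate_iff]
      refine ⟨by simp, ?_⟩
      intro b hb
      simp only [List.mem_map, List.mem_range'] at hb
      obtain ⟨j, _, hj⟩ := hb
      simp [← hj]
  | cons p ps ih =>
      intro cnt last hlast hbnd hpw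
      obtain ⟨hlp, hpn⟩ := hbnd p (by simp)
      have hbnd' : ∀ q ∈ ps, last ≤ q ∧ q < n := fun q hq => hbnd q (by simp [hq])
      have hpwq : ∀ q ∈ ps, p < q := fun q hq => (List.pairwise_cons.mp hpw).1 q hq
      have hpw' : List.Pairwise (· < ·) ps := (List.pairwise_cons.mp hpw).2
      rw [rowGo]
      have hsplit : List.range' last (n + 1 - last)
          = List.range' last (p + 1 - last) ++ List.range' (p + 1) (n + 1 - (p + 1)) := by
        have h1 : p + 1 - last + (n + 1 - (p + 1)) = n + 1 - last := by omega
        have h2 : last + (p + 1 - last) = p + 1 := by omega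
        rw [← h1, ← List.range'_append_1, h2]
      rw [hsplit, List.map_append]
      congr 1
      · -- indices last..p : neither p nor any later position is < j
        symm
        rw [List.eq_replicate_iff]
        refine ⟨by simp, ?_⟩
        intro b hb
        simp only [List.mem_map, List.mem_range'] at hb
        obtain ⟨j, hj, hjb⟩ := hb
        have hcnt : (p :: ps).countP (fun q => decide (q < j)) = 0 := by
          rw [List.countP_eq_zero]
          intro q hq
          simp only [decide_eq_true_eq]
          rcases List.mem_cons.mp hq with h | h
          · omega
          · have := hpwq q h; omega
        rw [← hjb, hcnt]
        simp
      · rw [ih (cnt + 1) (p + 1) (by omega) (fun q hq => ⟨hpwq q hq, (hbnd' q hq).2⟩) hpw']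
        apply List.map_congr_left
        intro j hj
        simp only [List.mem_range'] at hj
        have hcnt : (p :: ps).countP (fun q => decide (q < j))
            = ps.countP (fun q => decide (q < j)) + 1 := by
          rw [List.countP_cons]
          simp only [decide_eq_true_eq]
          rw [if_pos (by omega)]
        rw [hcnt]
        push_cast
        ring

theorem pv_positions_pairwise (c : Nat) :
    ∀ (l : List Char) (off : Nat), List.Pairwise (· < ·) (pvPositions c off l) := by
  intro l
  induction l with
  | nil => intro off; simp [pvPositions]
  | cons ch rest ih =>
      intro off
      rw [pvPositions]
      rw [List.pairwise_append]
      refine ⟨by split <;> simp, ih (off + 1), ?_⟩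
      intro a ha b hb
      have hb' := pv_positions_bound c rest (off + 1) b hb
      split at ha <;> simp_all

theorem pv_alt_eq_tbl (s : String) :
    helper_alt s = pvTbl s.toList.length s.toList := by
  unfold helper_alt
  have hrep : (List.replicate 26 ([] : List Nat)) = (List.range 26).map (fun _ => []) := by
    simp
  rw [hrep, pv_bucketGo_inv, List.map_map]
  unfold pvTbl
  apply List.map_congr_left
  intro c hc
  simp only [Function.comp_apply, List.nil_append]
  have hbnd : ∀ p ∈ pvPositions c 0 s.toList, 0 ≤ p ∧ p < s.toList.length := by
    intro p hp
    have := pv_positions_bound c s.toList 0 p hp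
    omega
  have hlen : s.length = s.toList.length := by simp
  rw [hlen, pv_rowGo_eq s.toList.length (pvPositions c 0 s.toList) 0 0 (by omega) hbnd
      (pv_positions_pairwise c s.toList 0)]
  apply List.ext_getElem
  · simp
  · intro j h1 h2
    simp only [List.getElem_map, List.getElem_range', List.getElem_range]
    simp only [List.length_map, List.length_range'] at h1
    rw [Nat.zero_add, if_pos (by omega)]
    rw [← pv_positions_countP c s.toList 0 j]
    have : (fun p => decide (p < 0 + j)) = (fun p => decide (p < j)) := by
      funext p; simp
    rw [this]
    simp

-- ===== VERDICT (by name: the statement is the Claim_ definition above) =====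
theorem helper_spec : Claim_equal_helper := by
  intro s _ _
  show helper s = helper_alt s
  unfold helper
  have hlen : s.length = s.toList.length := by simp
  rw [hlen, ← pv_tbl_nil s.toList.length]
  have hinv := pv_helperGo_inv s.toList.length s.toList [] (by simp)
  simp only [List.length_nil, List.nil_append] at hinv
  rw [hinv, pv_alt_eq_tbl]
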